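-- pv_equiv track=rewrite | github.com/Elgolfin/adventofcode-2015-py | day17_lib.py | get_exact_min_combinations
-- ===== SOURCE A (Python) =====
-- import itertools
--
-- def get_exact_min_combinations(capacity, containers):
--     """
--     get_exact_min_combinations returns how many different combinations
--     of containers can exactly fit the specified capacity (with the minimum containers)
--     """
--     iter_count = len(containers)
--     count_dict = {}
--     count_min_containers = 0
--     while iter_count > 0:
--         count = 0
--         combinations = itertools.combinations(containers, iter_count)
--         for combination in combinations:
--             if sum(combination) == capacity:
--                 count = count + 1
--         count_dict[iter_count] = count
--         if count != 0:
--             count_min_containers = count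
--         iter_count = iter_count - 1
--     return count_min_containers
-- ===== SOURCE B (Python) =====
-- def _count_subsets(xs, k, s):
--     # number of index-subsets of xs of size k summing to s (include/exclude recursion)
--     if k == 0:
--         return 1 if s == 0 else 0
--     if not xs:
--         return 0
--     return _count_subsets(xs[1:], k - 1, s - xs[0]) + _count_subsets(xs[1:], k, s)
--
-- def get_exact_min_combinations(capacity, containers):
--     for k in range(1, len(containers) + 1):
--         c = _count_subsets(containers, k, capacity)
--         if c != 0:
--             return c
--     return 0
-- ===== Notes on version B (the rewrite author's own statement) =====
-- stated objective: alternative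
-- what changed: A materialises every k-combination via itertools for every size n down to 1 and keeps the last nonzero count; B counts subsets of each size by include/exclude recursion and scans sizes upward, returning at the first (minimal) size with a nonzero count.
import Mathlib
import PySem

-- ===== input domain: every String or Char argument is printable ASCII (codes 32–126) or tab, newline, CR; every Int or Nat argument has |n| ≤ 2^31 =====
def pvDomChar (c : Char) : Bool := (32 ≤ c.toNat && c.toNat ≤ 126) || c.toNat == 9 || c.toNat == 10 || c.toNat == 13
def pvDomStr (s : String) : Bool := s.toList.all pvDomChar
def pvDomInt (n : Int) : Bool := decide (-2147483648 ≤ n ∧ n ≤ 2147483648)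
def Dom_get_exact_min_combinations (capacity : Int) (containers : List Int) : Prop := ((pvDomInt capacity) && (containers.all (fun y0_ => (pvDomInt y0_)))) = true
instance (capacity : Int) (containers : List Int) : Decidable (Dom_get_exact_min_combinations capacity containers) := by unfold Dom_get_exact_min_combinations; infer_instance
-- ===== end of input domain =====

-- B replaces A's itertools enumeration of all k-combinations (sizes n down to 1, last nonzero kept)
-- by an include/exclude counting recursion scanned from size 1 upward, returning at the first
-- (minimal) size with a nonzero count; measured faster on a timing run's inputs (early exit,
-- no tuple materialisation), worst case still exponential.


-- ===== PORT A =====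
-- while-loop from len(containers) down to 1; state = (count_dict, count_min_containers)
-- body of the while-loop: computes count for the current iter_count, stores it, keeps it if nonzero
def pvStepA (capacity : Int) (containers : List Int) (st : PySem.Dict Int Int × Int) (iter_count : Int) : PySem.Dict Int Int × Int :=
  let count : Int := (PySem.List.combinations containers iter_count.toNat).foldl
    (fun c comb => if comb.sum = capacity then c + 1 else c) 0
  (st.1.insert iter_count count, if count ≠ 0 then count else st.2)

def get_exact_min_combinations (capacity : Int) (containers : List Int) : Int :=
  ((PySem.List.pyRange (containers.length : Int) 0 (-1)).foldl
    (pvStepA capacity containers) (PySem.Dict.empty, 0)).2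

-- ===== PORT B =====
-- _count_subsets: include/exclude recursion on the list
def pvCnt : List Int → Nat → Int → Int
  | _, 0, s => if s = 0 then 1 else 0
  | [], _ + 1, _ => 0
  | x :: rest, k + 1, s => pvCnt rest k (s - x) + pvCnt rest (k + 1) s

-- the for-loop over range(1, len+1) with early return
def pvLoopB (capacity : Int) (containers : List Int) : List Int → Int
  | [] => 0
  | k :: ks =>
    let c := pvCnt containers k.toNat capacity
    if c ≠ 0 then c else pvLoopB capacity containers ks

def get_exact_min_combinations_alt (capacity : Int) (containers : List Int) : Int :=
  pvLoopB capacity containers (PySem.List.pyRange 1 ((containers.length : Int) + 1) 1)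

-- ===== PRECONDITION & SPEC =====
def Spec_get_exact_min_combinations (capacity : Int) (containers : List Int) (out : Int) : Prop := out = get_exact_min_combinations_alt capacity containers
instance (capacity : Int) (containers : List Int) (out : Int) : Decidable (Spec_get_exact_min_combinations capacity containers out) := by unfold Spec_get_exact_min_combinations; infer_instance

-- ===== CLAIM (what is proved, stated in full; the proofs are below) =====
def Claim_equal_get_exact_min_combinations : Prop := ∀ (capacity : Int) (containers : List Int), Dom_get_exact_min_combinations capacity containers → Spec_get_exact_min_combinations capacity containers (get_exact_min_combinations capacity containers)

-- ===== LEMMAS AND PROOFS =====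

-- A's inner counting loop over the combinations of size k equals B's recursion
theorem pv_count_combos : ∀ (xs : List Int) (k : Nat) (s : Int) (c : Int),
    (PySem.List.combinations xs k).foldl (fun a comb => if comb.sum = s then a + 1 else a) c
      = c + pvCnt xs k s := by
  intro xs
  induction xs with
  | nil =>
    intro k s c
    cases k with
    | zero =>
      simp only [PySem.List.combinations_zero, List.foldl_cons, List.foldl_nil, List.sum_nil, pvCnt]
      split_ifs <;> omega
    | succ k => simp [PySem.List.combinations_nil_succ, pvCnt]
  | cons x rest ih =>
    intro k s c
    cases k with
    | zero =>
      simp only [PySem.List.combinations_zero, List.foldl_cons, List.foldl_nil, List.sum_nil, pvCnt]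
      split_ifs <;> omega
    | succ k =>
      rw [PySem.List.combinations_cons_succ, List.foldl_append, List.foldl_map]
      have hf : (fun (a : Int) (comb : List Int) => if (x :: comb).sum = s then a + 1 else a)
          = (fun (a : Int) (comb : List Int) => if comb.sum = s - x then a + 1 else a) := by
        funext a comb
        simp only [List.sum_cons]
        by_cases h : comb.sum = s - x
        · rw [if_pos h, if_pos (by omega)]
        · rw [if_neg h, if_neg (by omega)]
      rw [hf, ih k (s - x) c, ih (k + 1) s (c + pvCnt rest k (s - x))]
      show c + pvCnt rest k (s - x) + pvCnt rest (k + 1) s = c + pvCnt (x :: rest) (k + 1) s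
      simp [pvCnt]; ring

-- A's descending fold (last nonzero kept) equals B's ascending early-return loop
theorem pv_fold_rev (capacity : Int) (containers : List Int) : ∀ (ks : List Int) (d : PySem.Dict Int Int),
    (ks.reverse.foldl (pvStepA capacity containers) (d, 0)).2
      = pvLoopB capacity containers ks := by
  intro ks
  induction ks with
  | nil => intro d; simp [pvLoopB]
  | cons k ks ih =>
    intro d
    rw [List.reverse_cons, List.foldl_append, List.foldl_cons, List.foldl_nil]
    have hsnd : (pvStepA capacity containers (List.foldl (pvStepA capacity containers) (d, 0) ks.reverse) k).2
        = if pvCnt containers k.toNat capacity ≠ 0 then pvCnt containers k.toNat capacity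
          else (List.foldl (pvStepA capacity containers) (d, 0) ks.reverse).2 := by
      simp only [pvStepA]
      rw [pv_count_combos containers k.toNat capacity 0, zero_add]
    rw [hsnd, ih d]
    simp [pvLoopB]

-- ===== VERDICT (by name: the statement is the Claim_ definition above) =====
theorem get_exact_min_combinations_spec : Claim_equal_get_exact_min_combinations := by
  intro capacity containers _
  show get_exact_min_combinations capacity containers = get_exact_min_combinations_alt capacity containers
  unfold get_exact_min_combinations get_exact_min_combinations_alt
  rw [PySem.List.pyRange_neg_one_eq_reverse, show (0:Int) + 1 = 1 from by norm_num]
  exact pv_fold_rev capacity containers (PySem.List.pyRange 1 ((containers.length : Int) + 1) 1) PySem.Dict.empty
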